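-- pv_equiv track=rewrite | github.com/anthonyngu2/Advent-Of-Code | Day 8 - Space Image Format/Part 2.py | create_row_layers
-- ===== SOURCE A (Python) =====
-- def create_row_layers(file, width, height):
--     layer_size = width * height
--     layers_by_row  = [[] for i in range(height)]
--     row = []
--     start = 0
--     end = 0
--
--     while end < len(file):
--         for row_number in range(height):
--             end = start + width
--             layer_row = file[start:end]
--             layers_by_row[row_number].append(list(layer_row))
--             start += width
--
--     return layers_by_row
-- ===== SOURCE B (Python) =====
-- def create_row_layers(file, width, height):
--     layer_size = width * height
--     num_layers = 0 if not file else -(-len(file) // layer_size)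
--     result = []
--     for r in range(height):
--         row = []
--         for layer in range(num_layers):
--             base = layer * layer_size + r * width
--             row.append(list(file[base:base + width]))
--         result.append(row)
--     return result
-- ===== Notes on version B (the rewrite author's own statement) =====
-- stated objective: alternative
-- what changed: B replaces A's while-loop that appends layer rows sequentially (layer-major, tracking start/end cursors) with a closed-form layer count K = ceil(len(file)/(width*height)) and a transposed row-major double loop that reads each slice at a computed strided offset.
import Mathlib
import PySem

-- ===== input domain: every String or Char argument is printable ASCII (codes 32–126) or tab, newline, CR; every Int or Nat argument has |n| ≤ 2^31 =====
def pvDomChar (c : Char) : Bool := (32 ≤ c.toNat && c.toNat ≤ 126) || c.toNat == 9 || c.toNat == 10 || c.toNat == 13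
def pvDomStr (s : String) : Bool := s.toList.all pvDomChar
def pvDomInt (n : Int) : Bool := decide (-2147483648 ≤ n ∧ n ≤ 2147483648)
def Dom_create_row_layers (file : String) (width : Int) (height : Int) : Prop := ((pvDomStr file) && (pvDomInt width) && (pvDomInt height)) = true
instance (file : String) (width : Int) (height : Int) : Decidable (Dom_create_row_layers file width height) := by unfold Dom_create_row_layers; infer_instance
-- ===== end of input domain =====

-- B computes the layer count in closed form (ceiling division) and transposes A's loop nesting,
-- reading the string in strided, row-first order instead of layer-first (objective: alternative).

-- ===== PORT A =====
-- body of A's inner 'for row_number in range(height)' loop; state = (layers_by_row, start, end)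
def pvA_step (chars : List Char) (width : Int)
    (st : List (List (List String)) × Int × Int) (rn : Int) :
    List (List (List String)) × Int × Int :=
  let e := st.2.1 + width
  let layer_row := PySem.List.slice chars (some st.2.1) (some e)
  (st.1.modify rn.toNat (fun row => row ++ [layer_row.map (fun c => String.ofList [c])]),
   st.2.1 + width, e)

-- A's 'while end < len(file)' loop; the fuel is a totality guard only (len(file)+1 suffices on Pre_)
def pvA_loop (chars : List Char) (width height : Int) :
    Nat → List (List (List String)) → Int → Int → List (List (List String))
  | 0, layers, _, _ => layers
  | fuel+1, layers, start, endv =>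
    if endv < (chars.length : Int) then
      let st := (PySem.List.pyRange 0 height 1).foldl (pvA_step chars width) (layers, start, endv)
      pvA_loop chars width height fuel st.1 st.2.1 st.2.2
    else layers

def create_row_layers (file : String) (width : Int) (height : Int) : List (List (List String)) :=
  pvA_loop file.toList width height (file.toList.length + 1)
    ((PySem.List.pyRange 0 height 1).map (fun _ => [])) 0 0

-- ===== PORT B =====
def create_row_layers_alt (file : String) (width : Int) (height : Int) : List (List (List String)) :=
  let chars := file.toList
  let layer_size := width * height
  let num_layers : Int :=
    if chars.length = 0 then 0
    else -(PySem.Int.floordiv (-(chars.length : Int)) layer_size)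
  (PySem.List.pyRange 0 height 1).map (fun r =>
    (PySem.List.pyRange 0 num_layers 1).map (fun layer =>
      let base := layer * layer_size + r * width
      (PySem.List.slice chars (some base) (some (base + width))).map (fun c => String.ofList [c])))

-- ===== PRECONDITION & SPEC =====
-- Pre_ excludes exactly the inputs on which A never returns: on a nonempty file with width ≤ 0 or
-- height ≤ 0 A's while loop diverges ('end' never reaches len(file)); A returns on everything else.
def Pre_create_row_layers (file : String) (width : Int) (height : Int) : Prop :=
  file = "" ∨ (1 ≤ width ∧ 1 ≤ height)
instance (file : String) (width : Int) (height : Int) : Decidable (Pre_create_row_layers file width height) := by unfold Pre_create_row_layers; infer_instance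

def pvWitness_create_row_layers : String × Int × Int := ("123456789012", 3, 2)

def Spec_create_row_layers (file : String) (width : Int) (height : Int) (out : List (List (List String))) : Prop := out = create_row_layers_alt file width height
instance (file : String) (width : Int) (height : Int) (out : List (List (List String))) : Decidable (Spec_create_row_layers file width height out) := by unfold Spec_create_row_layers; infer_instance

-- ===== CLAIM (what is proved, stated in full; the proofs are below) =====
def Claim_equal_create_row_layers : Prop := ∀ (file : String) (width : Int) (height : Int), Dom_create_row_layers file width height → Pre_create_row_layers file width height → Spec_create_row_layers file width height (create_row_layers file width height)

-- ===== LEMMAS AND PROOFS =====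

-- the list of single-char strings both programs extract for one row of one layer
def pvRowSlice (chars : List Char) (w b : Int) : List String :=
  (PySem.List.slice chars (some b) (some (b + w))).map (fun c => String.ofList [c])

-- layers_by_row after k complete layers have been processed
def pvL (chars : List Char) (w ls h : Int) (k : Nat) : List (List (List String)) :=
  (PySem.List.pyRange 0 h 1).map
    (fun r => (List.range k).map (fun (j : Nat) => pvRowSlice chars w ((j : Int) * ls + r * w)))

lemma pv_modify_append {α : Type} (Lpre : List α) (a : α) (rest : List α) (f : α → α) :
    (Lpre ++ a :: rest).modify Lpre.length f = Lpre ++ f a :: rest := by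
  simp [List.modify_eq_set_getElem?]

-- one pass of A's inner for-loop over the tail Lsuf of layers_by_row
lemma pv_inner (chars : List Char) (w : Int)
    (Lsuf Lpre : List (List (List String))) (s e : Int) :
    (PySem.List.pyRange (Lpre.length : Int) ((Lpre.length : Int) + (Lsuf.length : Int)) 1).foldl
      (pvA_step chars w) (Lpre ++ Lsuf, s, e)
    = (Lpre ++ Lsuf.mapIdx (fun i row => row ++ [pvRowSlice chars w (s + (i : Int) * w)]),
       s + (Lsuf.length : Int) * w,
       match Lsuf with | [] => e | _ :: _ => s + (Lsuf.length : Int) * w) := by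
  induction Lsuf generalizing Lpre s e with
  | nil => simp [PySem.List.pyRange_one_eq_nil]
  | cons row rest ih =>
    rw [PySem.List.pyRange_one_cons (by simp only [List.length_cons]; push_cast; omega)]
    simp only [List.foldl_cons]
    have hstep : pvA_step chars w (Lpre ++ row :: rest, s, e) (Lpre.length : Int)
        = (Lpre ++ (row ++ [pvRowSlice chars w s]) :: rest, s + w, s + w) := by
      simp [pvA_step, pvRowSlice, pv_modify_append]
    rw [hstep]
    have hlen : ((Lpre ++ [row ++ [pvRowSlice chars w s]]).length : Int) = (Lpre.length : Int) + 1 := by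
      simp
    have := ih (Lpre ++ [row ++ [pvRowSlice chars w s]]) (s + w) (s + w)
    rw [hlen] at this
    have harg : (Lpre.length : Int) + 1 + (rest.length : Int)
        = (Lpre.length : Int) + ((row :: rest).length : Int) := by
      simp only [List.length_cons]; push_cast; omega
    rw [harg] at this
    rw [show Lpre ++ [row ++ [pvRowSlice chars w s]] ++ rest
        = Lpre ++ (row ++ [pvRowSlice chars w s]) :: rest by simp] at this
    rw [this]
    congr 1
    · rw [List.append_assoc]
      congr 1
      rw [List.mapIdx_cons]
      have hfun : (fun (i : Nat) (row : List (List String)) =>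
            row ++ [pvRowSlice chars w (s + w + (i : Int) * w)])
          = (fun (i : Nat) (row : List (List String)) =>
            row ++ [pvRowSlice chars w (s + ((i : Int) + 1) * w)]) := by
        funext i r
        have : s + w + (i : Int) * w = s + ((i : Int) + 1) * w := by ring
        rw [this]
      simp [hfun]
    · cases rest with
      | nil => simp
      | cons a t =>
        simp only [Prod.mk.injEq, List.length_cons]
        push_cast
        exact ⟨by ring, by ring⟩

-- processing one full layer takes pvL k to pvL (k+1)
lemma pv_layer (chars : List Char) (w ls h : Int) (hh : 1 ≤ h) (hls : ls = w * h)
    (k : Nat) (e : Int) :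
    (PySem.List.pyRange 0 h 1).foldl (pvA_step chars w)
      (pvL chars w ls h k, (k : Int) * ls, e)
    = (pvL chars w ls h (k + 1), ((k : Int) + 1) * ls, ((k : Int) + 1) * ls) := by
  have hlen : ((pvL chars w ls h k).length : Int) = h := by
    simp [pvL, PySem.List.length_pyRange_one]; omega
  have := pv_inner chars w (pvL chars w ls h k) [] ((k : Int) * ls) e
  simp only [List.length_nil, Int.natCast_zero, List.nil_append, zero_add, hlen] at this
  rw [this]
  have hne : pvL chars w ls h k ≠ [] := by
    intro hE
    rw [hE] at hlen
    simp at hlen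
    omega
  refine Prod.ext ?_ (Prod.ext ?_ ?_)
  · simp only []
    apply List.ext_getElem
    · simp [pvL]
    · intro i h1 h2
      simp only [pvL, List.getElem_mapIdx, List.getElem_map,
        PySem.List.getElem_pyRange_one, List.range_succ, zero_add]
      simp
  · simp only []
    rw [hls]; ring
  · simp only []
    cases hE : pvL chars w ls h k with
    | nil => exact absurd hE hne
    | cons a t =>
      simp only []
      rw [hls]; ring

lemma pv_loop_stop (chars : List Char) (w h : Int) (fuel : Nat)
    (L : List (List (List String))) (s e : Int) (he : ¬ e < (chars.length : Int)) :
    pvA_loop chars w h fuel L s e = L := by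
  cases fuel <;> simp [pvA_loop, he]

lemma pv_outer (chars : List Char) (w h : Int) (hw : 1 ≤ w) (hh : 1 ≤ h)
    (K : Nat)
    (hK1 : ((K : Int) - 1) * (w * h) < (chars.length : Int))
    (hK2 : (chars.length : Int) ≤ (K : Int) * (w * h)) :
    ∀ (fuel k : Nat) (e : Int), (k : Int) * (w * h) < (chars.length : Int) →
      e < (chars.length : Int) → K ≤ k + fuel →
      pvA_loop chars w h fuel (pvL chars w (w * h) h k) ((k : Int) * (w * h)) e
        = pvL chars w (w * h) h K := by
  have hls : (0 : Int) < w * h := by positivity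
  intro fuel
  induction fuel with
  | zero =>
    intro k e hk he hK
    exfalso
    have : (k : Int) < (K : Int) := by
      by_contra hc
      push_neg at hc
      have : (K : Int) * (w * h) ≤ (k : Int) * (w * h) :=
        mul_le_mul_of_nonneg_right hc (le_of_lt hls)
      omega
    have : K ≤ k := by omega
    omega
  | succ n ih =>
    intro k e hk he hK
    rw [pvA_loop, if_pos he]
    rw [pv_layer chars w (w * h) h hh rfl k e]
    simp only []
    by_cases hnext : ((k : Int) + 1) * (w * h) < (chars.length : Int)
    · have := ih (k + 1) (((k : Int) + 1) * (w * h)) (by push_cast; exact hnext) hnext (by omega)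
      push_cast at this ⊢
      exact this
    · rw [pv_loop_stop _ _ _ _ _ _ _ hnext]
      have hKk : (K : Int) = (k : Int) + 1 := by
        have h1 : (K : Int) - 1 < (k : Int) + 1 := by
          by_contra hc
          push_neg at hc
          have : ((k : Int) + 1) * (w * h) ≤ ((K : Int) - 1) * (w * h) :=
            mul_le_mul_of_nonneg_right hc (le_of_lt hls)
          omega
        have h2 : (k : Int) < (K : Int) := by
          by_contra hc
          push_neg at hc
          have : (K : Int) * (w * h) ≤ (k : Int) * (w * h) :=
            mul_le_mul_of_nonneg_right hc (le_of_lt hls)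
          omega
        omega
      have : K = k + 1 := by omega
      rw [this]

theorem pv_main (file : String) (width height : Int)
    (hpre : file = "" ∨ (1 ≤ width ∧ 1 ≤ height)) :
    create_row_layers file width height = create_row_layers_alt file width height := by
  by_cases hE : file.toList = []
  · have hlen : file.toList.length = 0 := by simp [hE]
    simp [create_row_layers, create_row_layers_alt, hlen, pvA_loop,
      PySem.List.pyRange_one_eq_nil (le_refl (0 : Int))]
  · obtain ⟨hw, hh⟩ : 1 ≤ width ∧ 1 ≤ height := by
      rcases hpre with h | h
      · exact absurd (by simp [h]) hE
      · exact h
    set chars := file.toList with hchars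
    have hlenpos : 0 < chars.length := List.length_pos_of_ne_nil hE
    have hls : (0 : Int) < width * height := by positivity
    set K : Int := -(PySem.Int.floordiv (-(chars.length : Int)) (width * height)) with hKdef
    have hbr := (PySem.Int.neg_floordiv_neg_eq_iff_of_pos (a := (chars.length : Int)) (b := width * height) (q := K) hls).mp rfl
    have hKpos : 0 < K := by
      rcases hbr with ⟨h1, h2⟩
      by_contra hc
      push_neg at hc
      have : K * (width * height) ≤ 0 * (width * height) :=
        mul_le_mul_of_nonneg_right hc (le_of_lt hls)
      omega
    have hKnat : ((K.toNat : Int)) = K := Int.toNat_of_nonneg (le_of_lt hKpos)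
    have hA : create_row_layers file width height = pvL chars width (width * height) height K.toNat := by
      have hL0 : (PySem.List.pyRange 0 height 1).map
          (fun _ => ([] : List (List String))) = pvL chars width (width * height) height 0 := by
        simp [pvL]
      have hfuel : K.toNat ≤ 0 + (chars.length + 1) := by
        rcases hbr with ⟨h1, h2⟩
        have : (K - 1) * 1 ≤ (K - 1) * (width * height) :=
          mul_le_mul_of_nonneg_left (by omega) (by omega)
        omega
      have := pv_outer chars width height hw hh K.toNat
        (by rw [hKnat]; exact hbr.1) (by rw [hKnat]; exact hbr.2)
        (chars.length + 1) 0 0 (by simpa using hlenpos) (by exact_mod_cast hlenpos) hfuel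
      simp only [Int.natCast_zero, zero_mul] at this
      rw [create_row_layers, ← hchars, hL0]
      exact this
    have hB : create_row_layers_alt file width height = pvL chars width (width * height) height K.toNat := by
      rw [create_row_layers_alt]
      simp only [← hchars, if_neg (Nat.pos_iff_ne_zero.mp hlenpos), ← hKdef, pvL]
      apply List.map_congr_left
      intro r hr
      rw [PySem.List.pyRange_one 0 K]
      simp [Function.comp, pvRowSlice]
    rw [hA, hB]

-- ===== VERDICT (by name: the statement is the Claim_ definition above) =====
theorem create_row_layers_spec : Claim_equal_create_row_layers := by
  intro file width height _ hpre
  exact pv_main file width height hpre
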